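-- pv_equiv track=rewrite | github.com/AlgorithmicResearchGroup/epsilon | examples/benchmark_scout/workflow.py | _score_keyword_map
-- ===== SOURCE A (Python) =====
-- from typing import Any, Dict, Iterable, List, Mapping, Sequence
--
-- def _score_keyword_map(text: str, weights: Mapping[str, int]) -> tuple[int, List[str]]:
--     score = 0
--     hits: List[str] = []
--     lowered = text.casefold()
--     for term, weight in weights.items():
--         if term in lowered:
--             score += weight
--             hits.append(term)
--     return score, hits
-- ===== SOURCE B (Python) =====
-- from typing import List, Mapping
--
-- def _score_keyword_map(text: str, weights: Mapping[str, int]) -> tuple[int, List[str]]: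
--     # Index the text once per distinct term length: the set of all windows of
--     # that length supports O(1) hash lookups instead of a substring scan per term.
--     lowered = text.casefold()
--     n = len(lowered)
--     windows = {}  # term length -> set of substrings of lowered of that length
--     score = 0
--     hits: List[str] = []
--     for term, weight in weights.items():
--         L = len(term)
--         if L not in windows:
--             windows[L] = {lowered[i:i + L] for i in range(n - L + 1)}
--         if term in windows[L]:
--             score += weight
--             hits.append(term)
--     return score, hits
-- ===== Notes on version B (the rewrite author's own statement) =====
-- stated objective: faster
-- what changed: Instead of scanning the text for each term, B builds (memoised per distinct term length) a hash set of all windows of the lowered text of that length and answers each term by one set lookup.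
import Mathlib
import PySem

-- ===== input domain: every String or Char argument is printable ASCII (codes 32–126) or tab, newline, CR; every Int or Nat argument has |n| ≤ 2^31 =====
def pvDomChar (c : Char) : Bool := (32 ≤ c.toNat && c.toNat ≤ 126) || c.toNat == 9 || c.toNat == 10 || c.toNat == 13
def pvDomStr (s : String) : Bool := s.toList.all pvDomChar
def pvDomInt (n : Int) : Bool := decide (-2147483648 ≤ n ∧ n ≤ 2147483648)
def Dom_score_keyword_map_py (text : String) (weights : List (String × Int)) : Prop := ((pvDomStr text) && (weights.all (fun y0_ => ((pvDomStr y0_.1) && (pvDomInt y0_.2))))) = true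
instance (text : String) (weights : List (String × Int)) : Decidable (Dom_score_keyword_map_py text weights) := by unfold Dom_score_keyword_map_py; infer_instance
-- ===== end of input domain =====

-- B indexes the lowered text once per distinct term length (a set of all windows of that
-- length), replacing A's per-term substring scan with hash-set lookups; measured faster.


-- ===== PORT A =====
-- for term, weight in weights.items(): if term in lowered: score += weight; hits.append(term)
def score_keyword_map_py (text : String) (weights : List (String × Int)) : Int × List String :=
  let lowered := PySem.Str.lower text   -- casefold = lower on the ASCII domain
  (PySem.Dict.ofList weights).items.foldl
    (fun acc tw => if PySem.Str.isIn tw.1 lowered then (acc.1 + tw.2, acc.2 ++ [tw.1]) else acc)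
    (0, [])

-- ===== PORT B =====
-- {lowered[i:i+L] for i in range(n - L + 1)}
def pvWindows (lowered : String) (L : Int) : PySem.Set String :=
  PySem.Set.ofList ((PySem.List.pyRange 0 (PySem.Str.len lowered - L + 1)).map
    (fun i => PySem.Str.slice lowered (some i) (some (i + L))))

-- one iteration of B's loop: memoise windows[L], then set lookup
def pvAltStep (lowered : String)
    (st : PySem.Dict Int (PySem.Set String) × Int × List String)
    (tw : String × Int) : PySem.Dict Int (PySem.Set String) × Int × List String :=
  let L := PySem.Str.len tw.1
  let w := if st.1.contains L then st.1 else st.1.insert L (pvWindows lowered L)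
  if PySem.Set.contains ((w.get? L).getD PySem.Set.empty) tw.1 then
    (w, st.2.1 + tw.2, st.2.2 ++ [tw.1])
  else
    (w, st.2.1, st.2.2)

def score_keyword_map_py_alt (text : String) (weights : List (String × Int)) : Int × List String :=
  let lowered := PySem.Str.lower text
  let res := (PySem.Dict.ofList weights).items.foldl (pvAltStep lowered)
    (PySem.Dict.empty, 0, [])
  (res.2.1, res.2.2)

-- ===== PRECONDITION & SPEC =====
def Spec_score_keyword_map_py (text : String) (weights : List (String × Int)) (out : Int × List String) : Prop := out = score_keyword_map_py_alt text weights
instance (text : String) (weights : List (String × Int)) (out : Int × List String) : Decidable (Spec_score_keyword_map_py text weights out) := by unfold Spec_score_keyword_map_py; infer_instance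

-- ===== CLAIM (what is proved, stated in full; the proofs are below) =====
def Claim_equal_score_keyword_map_py : Prop := ∀ (text : String) (weights : List (String × Int)), Dom_score_keyword_map_py text weights → Spec_score_keyword_map_py text weights (score_keyword_map_py text weights)

-- ===== LEMMAS AND PROOFS =====

-- the window set of length (len t) contains t iff t is a substring of lowered
theorem contains_pvWindows (lowered t : String) :
    PySem.Set.contains (pvWindows lowered (PySem.Str.len t)) t = PySem.Str.isIn t lowered := by
  rw [Bool.eq_iff_iff, PySem.Set.contains_iff, PySem.Str.isIn_iff_infix]
  unfold pvWindows
  rw [PySem.Set.mem_ofList, List.mem_map]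
  have hlen : PySem.Str.len t = (t.toList.length : Int) := PySem.Str.len_eq t
  have hlen' : PySem.Str.len lowered = (lowered.toList.length : Int) := PySem.Str.len_eq lowered
  set s := lowered.toList with hs
  set cs := t.toList with hcs
  constructor
  · rintro ⟨i, hi, hslice⟩
    rw [PySem.List.mem_pyRange_one] at hi
    obtain ⟨hi0, hiub⟩ := hi
    have h1 : (PySem.Str.slice lowered (some i) (some (i + PySem.Str.len t))).toList = cs := by
      rw [hslice]
    rw [PySem.Str.toList_slice, PySem.Chars.slice_eq_listSlice] at h1
    rw [PySem.List.slice_toNat _ hi0 (by rw [hlen]; omega)] at h1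
    have hL : (i + PySem.Str.len t).toNat - i.toNat = cs.length := by rw [hlen]; omega
    rw [hL] at h1
    have hpre' : cs <+: s.drop i.toNat := by rw [← h1]; exact List.take_prefix _ _
    exact (PySem.Chars.isIn_iff_infix cs s).mp
      ((PySem.Chars.exists_prefix_drop_iff_isIn cs s).mp ⟨i.toNat, hpre'⟩)
  · intro hinf
    obtain ⟨j, hpre⟩ := (PySem.Chars.exists_prefix_drop_iff_isIn cs s).mpr
      ((PySem.Chars.isIn_iff_infix cs s).mpr hinf)
    by_cases h0 : cs.length = 0
    · -- empty term: witness i = 0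
      refine ⟨0, ?_, ?_⟩
      · rw [PySem.List.mem_pyRange_one, hlen', hlen]
        constructor
        · rfl
        · omega
      · rw [← String.toList_inj, PySem.Str.toList_slice, PySem.Chars.slice_eq_listSlice,
            PySem.List.slice_toNat _ le_rfl (by rw [hlen]; omega)]
        have hz : ((0 : Int) + PySem.Str.len t).toNat - ((0 : Int)).toNat = 0 := by
          rw [hlen]; omega
        rw [hz, List.take_zero]
        exact (List.length_eq_zero_iff.mp h0).symm
    · -- nonempty term: the occurrence fits, j + len cs ≤ len s
      have hle : cs.length ≤ (s.drop j).length := hpre.length_le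
      rw [List.length_drop] at hle
      have hj : j + cs.length ≤ s.length := by omega
      refine ⟨(j : Int), ?_, ?_⟩
      · rw [PySem.List.mem_pyRange_one, hlen', hlen]
        constructor
        · exact Int.natCast_nonneg j
        · omega
      · rw [← String.toList_inj, PySem.Str.toList_slice, PySem.Chars.slice_eq_listSlice,
            PySem.List.slice_toNat _ (Int.natCast_nonneg j) (by rw [hlen]; omega)]
        have htn : ((j : Int) + PySem.Str.len t).toNat - ((j : Int)).toNat = cs.length := by
          rw [hlen]; omega
        rw [htn, Int.toNat_natCast]
        exact (List.prefix_iff_eq_take.mp hpre).symm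

-- B's fold with a correctly-memoised dict computes A's fold
theorem fold_agree (lowered : String) (l : List (String × Int))
    (d : PySem.Dict Int (PySem.Set String)) (a : Int) (h : List String)
    (hinv : ∀ L ws, d.get? L = some ws → ws = pvWindows lowered L) :
    (l.foldl (pvAltStep lowered) (d, a, h)).2 =
    l.foldl (fun acc tw => if PySem.Str.isIn tw.1 lowered then (acc.1 + tw.2, acc.2 ++ [tw.1]) else acc) (a, h) := by
  induction l generalizing d a h with
  | nil => rfl
  | cons tw rest ih =>
    simp only [List.foldl_cons]
    by_cases hc : d.contains (PySem.Str.len tw.1) = true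
    · -- windows for this length already memoised
      have hsome : (d.get? (PySem.Str.len tw.1)).isSome = true := by
        rw [← PySem.Dict.contains_eq_isSome_get?]; exact hc
      obtain ⟨ws, hws⟩ := Option.isSome_iff_exists.mp hsome
      have hwin : (d.get? (PySem.Str.len tw.1)).getD PySem.Set.empty
          = pvWindows lowered (PySem.Str.len tw.1) := by
        rw [hws, Option.getD_some]; exact hinv _ ws hws
      have step : pvAltStep lowered (d, a, h) tw =
          (d, if PySem.Str.isIn tw.1 lowered then (a + tw.2, h ++ [tw.1]) else (a, h)) := by
        unfold pvAltStep
        simp only [hc, if_true, hwin, contains_pvWindows]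
        by_cases hi : PySem.Chars.isIn tw.1.toList lowered.toList = true <;>
          simp [PySem.Str.isIn_eq, hi]
      rw [step]
      by_cases hin : PySem.Str.isIn tw.1 lowered = true
      · simp only [hin, if_true]; exact ih d _ _ hinv
      · simp only [hin, Bool.false_eq_true, if_false]; exact ih d _ _ hinv
    · -- memoise the windows for this length now
      have hget : ((d.insert (PySem.Str.len tw.1) (pvWindows lowered (PySem.Str.len tw.1))).get?
            (PySem.Str.len tw.1)).getD PySem.Set.empty
          = pvWindows lowered (PySem.Str.len tw.1) := by
        rw [PySem.Dict.get?_insert d _ _ _]; simp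
      have step : pvAltStep lowered (d, a, h) tw =
          (d.insert (PySem.Str.len tw.1) (pvWindows lowered (PySem.Str.len tw.1)),
           if PySem.Str.isIn tw.1 lowered then (a + tw.2, h ++ [tw.1]) else (a, h)) := by
        unfold pvAltStep
        simp only [hc, Bool.false_eq_true, if_false, hget, contains_pvWindows]
        by_cases hi : PySem.Chars.isIn tw.1.toList lowered.toList = true <;>
          simp [PySem.Str.isIn_eq, hi]
      rw [step]
      have hinv' : ∀ L' ws,
          (d.insert (PySem.Str.len tw.1) (pvWindows lowered (PySem.Str.len tw.1))).get? L' = some ws →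
          ws = pvWindows lowered L' := by
        intro L' ws hws
        rw [PySem.Dict.get?_insert d _ L' _] at hws
        by_cases he : L' = PySem.Str.len tw.1
        · rw [if_pos he] at hws; cases hws; rw [he]
        · rw [if_neg he] at hws; exact hinv L' ws hws
      by_cases hin : PySem.Str.isIn tw.1 lowered = true
      · simp only [hin, if_true]; exact ih _ _ _ hinv'
      · simp only [hin, Bool.false_eq_true, if_false]; exact ih _ _ _ hinv'

-- ===== VERDICT (by name: the statement is the Claim_ definition above) =====
theorem score_keyword_map_py_spec : Claim_equal_score_keyword_map_py := by
  intro text weights _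
  unfold Spec_score_keyword_map_py score_keyword_map_py score_keyword_map_py_alt
  simp only
  rw [fold_agree (PySem.Str.lower text) _ PySem.Dict.empty 0 []
    (fun L ws hws => by rw [PySem.Dict.get?_empty] at hws; cases hws)]
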